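-- pv_equiv track=rewrite | github.com/PRHLT/E2EHTREval | EvalE2EHTR.py | computeSIDerr
-- ===== SOURCE A (Python) =====
-- def computeSIDerr(alignLvd):
--     s = i = d = c = 0
--     if len(alignLvd) == 0: return (0,0,0)
--     for l in alignLvd:
--         if l[2] == 1:
--             if l[0] == -1: d+=1
--             elif l[1] == -1: i+=1
--             else: s+=1
--         else: c+=1
--     return (s,i,d,c)
-- ===== SOURCE B (Python) =====
-- def computeSIDerr(alignLvd):
--     if len(alignLvd) == 0: return (0, 0, 0)
--     c = sum(1 for l in alignLvd if l[2] != 1)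
--     d = sum(1 for l in alignLvd if l[2] == 1 and l[0] == -1)
--     i = sum(1 for l in alignLvd if l[2] == 1 and l[0] != -1 and l[1] == -1)
--     s = sum(1 for l in alignLvd if l[2] == 1 and l[0] != -1 and l[1] != -1)
--     return (s, i, d, c)
-- ===== Notes on version B (the rewrite author's own statement) =====
-- stated objective: alternative
-- what changed: Replaces the single accumulator loop with branching by four independent filtered counts (countP-style aggregations), one per category, combined at the end.
import Mathlib
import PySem

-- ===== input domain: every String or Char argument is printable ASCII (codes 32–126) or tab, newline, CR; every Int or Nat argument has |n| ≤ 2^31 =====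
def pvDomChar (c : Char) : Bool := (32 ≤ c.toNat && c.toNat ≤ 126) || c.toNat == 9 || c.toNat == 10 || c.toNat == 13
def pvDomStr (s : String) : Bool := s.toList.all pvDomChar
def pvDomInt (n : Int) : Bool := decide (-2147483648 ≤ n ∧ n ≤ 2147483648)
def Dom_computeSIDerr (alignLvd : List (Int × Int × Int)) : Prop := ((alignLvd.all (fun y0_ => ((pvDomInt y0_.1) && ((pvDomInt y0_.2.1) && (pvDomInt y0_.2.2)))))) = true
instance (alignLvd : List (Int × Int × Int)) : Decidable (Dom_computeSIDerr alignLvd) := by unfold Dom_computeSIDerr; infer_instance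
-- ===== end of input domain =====

-- ===== PORT A =====
-- literal port of A: one pass with a 4-field accumulator and the branch order of the Python
def computeSIDerr (alignLvd : List (Int × Int × Int)) : List Int :=
  if alignLvd.length = 0 then [0, 0, 0]
  else
    let st := alignLvd.foldl (fun (acc : Int × Int × Int × Int) (l : Int × Int × Int) =>
      let (s, i, d, c) := acc
      if l.2.2 = 1 then
        if l.1 = -1 then (s, i, d + 1, c)
        else if l.2.1 = -1 then (s, i + 1, d, c)
        else (s + 1, i, d, c)
      else (s, i, d, c + 1)) (0, 0, 0, 0)
    [st.1, st.2.1, st.2.2.1, st.2.2.2]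

-- ===== PORT B =====
-- port of B: four independent filtered counts
def computeSIDerr_alt (alignLvd : List (Int × Int × Int)) : List Int :=
  if alignLvd.length = 0 then [0, 0, 0]
  else
    let c : Int := alignLvd.countP (fun l => l.2.2 ≠ 1)
    let d : Int := alignLvd.countP (fun l => l.2.2 = 1 ∧ l.1 = -1)
    let i : Int := alignLvd.countP (fun l => l.2.2 = 1 ∧ l.1 ≠ -1 ∧ l.2.1 = -1)
    let s : Int := alignLvd.countP (fun l => l.2.2 = 1 ∧ l.1 ≠ -1 ∧ l.2.1 ≠ -1)
    [s, i, d, c]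

-- ===== PRECONDITION & SPEC =====
def Spec_computeSIDerr (alignLvd : List (Int × Int × Int)) (out : List Int) : Prop := out = computeSIDerr_alt alignLvd
instance (alignLvd : List (Int × Int × Int)) (out : List Int) : Decidable (Spec_computeSIDerr alignLvd out) := by unfold Spec_computeSIDerr; infer_instance

-- ===== CLAIM (what is proved, stated in full; the proofs are below) =====
def Claim_equal_computeSIDerr : Prop := ∀ (alignLvd : List (Int × Int × Int)), Dom_computeSIDerr alignLvd → Spec_computeSIDerr alignLvd (computeSIDerr alignLvd)

-- ===== LEMMAS AND PROOFS =====

-- ===== VERDICT (by name: the statement is the Claim_ definition above) =====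
theorem fold_counts (alignLvd : List (Int × Int × Int)) (s i d c : Int) :
    alignLvd.foldl (fun (acc : Int × Int × Int × Int) (l : Int × Int × Int) =>
      let (s, i, d, c) := acc
      if l.2.2 = 1 then
        if l.1 = -1 then (s, i, d + 1, c)
        else if l.2.1 = -1 then (s, i + 1, d, c)
        else (s + 1, i, d, c)
      else (s, i, d, c + 1)) (s, i, d, c)
    = (s + alignLvd.countP (fun l => l.2.2 = 1 ∧ l.1 ≠ -1 ∧ l.2.1 ≠ -1),
       i + alignLvd.countP (fun l => l.2.2 = 1 ∧ l.1 ≠ -1 ∧ l.2.1 = -1),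
       d + alignLvd.countP (fun l => l.2.2 = 1 ∧ l.1 = -1),
       c + alignLvd.countP (fun l => l.2.2 ≠ 1)) := by
  induction alignLvd generalizing s i d c with
  | nil => simp
  | cons h t ih =>
    simp only [List.foldl_cons, List.countP_cons]
    by_cases h2 : h.2.2 = 1 <;> by_cases h0 : h.1 = -1 <;> by_cases h1 : h.2.1 = -1 <;>
      simp [h2, h0, h1, ih] <;> push_cast <;> ring_nf

theorem computeSIDerr_spec : Claim_equal_computeSIDerr := by
  intro alignLvd _
  unfold Spec_computeSIDerr computeSIDerr computeSIDerr_alt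
  by_cases hE : alignLvd.length = 0
  · simp [hE]
  · simp only [hE, if_false, fold_counts]
    simp
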